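-- pv_equiv track=rewrite | github.com/at0m-b0mb/archive-cracker | archive_cracker.py | generate_mask_passwords
-- ===== SOURCE A (Python) =====
-- import itertools
--
-- MASK_CHARSETS = {
--     '?l': 'abcdefghijklmnopqrstuvwxyz',
--     '?u': 'ABCDEFGHIJKLMNOPQRSTUVWXYZ',
--     '?d': '0123456789',
--     '?s': '!@#$%^&*()_+-=[]{}|;:,.<>?',
--     '?a': ('abcdefghijklmnopqrstuvwxyzABCDEFGHIJKLMNOPQRSTUVWXYZ'
--            '0123456789!@#$%^&*()_+-=[]{}|;:,.<>?'),
-- }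
--
-- def generate_mask_passwords(mask):
--     """Yield passwords from a hashcat-style mask such as ``?l?l?d?d``."""
--     positions = []
--     i = 0
--     while i < len(mask):
--         token = mask[i:i + 2]
--         if token in MASK_CHARSETS:
--             positions.append(MASK_CHARSETS[token])
--             i += 2
--         else:
--             positions.append(mask[i])
--             i += 1
--     return (''.join(combo) for combo in itertools.product(*positions))
-- ===== SOURCE B (Python) =====
-- MASK_CHARSETS = {
--     '?l': 'abcdefghijklmnopqrstuvwxyz',
--     '?u': 'ABCDEFGHIJKLMNOPQRSTUVWXYZ',
--     '?d': '0123456789',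
--     '?s': '!@#$%^&*()_+-=[]{}|;:,.<>?',
--     '?a': ('abcdefghijklmnopqrstuvwxyzABCDEFGHIJKLMNOPQRSTUVWXYZ'
--            '0123456789!@#$%^&*()_+-=[]{}|;:,.<>?'),
-- }
--
--
-- def generate_mask_passwords(mask):
--     """Yield passwords from a hashcat-style mask such as ``?l?l?d?d``.
--
--     Password number k is decoded directly from its rank in mixed radix
--     (rightmost position varying fastest), instead of materialising
--     itertools.product's intermediate tuples.
--     """
--     positions = []
--     i = 0
--     while i < len(mask):
--         token = mask[i:i + 2]
--         if token in MASK_CHARSETS: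
--             positions.append(MASK_CHARSETS[token])
--             i += 2
--         else:
--             positions.append(mask[i])
--             i += 1
--     # steps[j] = (charset at j, number of passwords the suffix after j describes)
--     steps = []
--     n = 1
--     for cs in reversed(positions):
--         steps.append((cs, n))
--         n *= len(cs)
--     steps.reverse()
--     total = n
--
--     def decode(k):
--         out = []
--         for cs, m in steps:
--             q, k = divmod(k, m)
--             out.append(cs[q])
--         return ''.join(out)
--
--     return (decode(k) for k in range(total))
-- ===== Notes on version B (the rewrite author's own statement) =====
-- stated objective: alternative
-- what changed: Replaces itertools.product's iterative build-up of all intermediate prefix tuples by direct mixed-radix rank decoding: a suffix-size table is built once and password k is computed independently by divmod-peeling digits off its rank k.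
import Mathlib
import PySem

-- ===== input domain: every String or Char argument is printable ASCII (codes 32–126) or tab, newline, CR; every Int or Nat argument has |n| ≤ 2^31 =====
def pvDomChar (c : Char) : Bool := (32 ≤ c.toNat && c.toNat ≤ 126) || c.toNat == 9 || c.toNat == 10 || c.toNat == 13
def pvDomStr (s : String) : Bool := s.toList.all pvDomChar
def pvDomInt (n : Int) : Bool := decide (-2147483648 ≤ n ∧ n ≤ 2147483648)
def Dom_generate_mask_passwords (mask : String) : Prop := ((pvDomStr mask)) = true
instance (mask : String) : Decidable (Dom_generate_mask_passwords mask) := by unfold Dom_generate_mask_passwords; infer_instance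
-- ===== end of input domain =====

-- B replaces itertools.product's iterative prefix-list build-up by independent
-- mixed-radix rank decoding of each password index (alternative algorithm, same output order).

-- ===== PORT A =====
-- MASK_CHARSETS; values kept as List Char (Python 1-char strings are chars here).
def pvMaskCharsets : PySem.Dict String (List Char) := PySem.Dict.mk
  [("?l", "abcdefghijklmnopqrstuvwxyz".toList),
   ("?u", "ABCDEFGHIJKLMNOPQRSTUVWXYZ".toList),
   ("?d", "0123456789".toList),
   ("?s", "!@#$%^&*()_+-=[]{}|;:,.<>?".toList),
   ("?a", ("abcdefghijklmnopqrstuvwxyzABCDEFGHIJKLMNOPQRSTUVWXYZ0123456789!@#$%^&*()_+-=[]{}|;:,.<>?").toList)]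

-- the while loop over i: token = mask[i:i+2]; membership test = Dict.get? is some
def pvParseA : List Char → List (List Char)
  | [] => []
  | [c] => [[c]]   -- token is the single last char; no 1-char key exists, else-branch
  | c :: c2 :: rest' =>
      match PySem.Dict.get? pvMaskCharsets (String.mk [c, c2]) with
      | some cs => cs :: pvParseA rest'
      | none => [c] :: pvParseA (c2 :: rest')

-- itertools.product, as its documented equivalent: result = [[]]; for pool: extend each by each y
def pvProductA (pools : List (List Char)) : List (List Char) :=
  pools.foldl (fun result pool => result.flatMap (fun x => pool.map (fun y => x ++ [y]))) [[]]

def generate_mask_passwords (mask : String) : List String :=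
  (pvProductA (pvParseA mask.toList)).map (fun combo => String.mk combo)   -- ''.join(combo)

-- ===== PORT B =====
def pvParseB : List Char → List (List Char)
  | [] => []
  | [c] => [[c]]
  | c :: c2 :: rest' =>
      match PySem.Dict.get? pvMaskCharsets (String.mk [c, c2]) with
      | some cs => cs :: pvParseB rest'
      | none => [c] :: pvParseB (c2 :: rest')

-- decode's loop (out.append per (cs, n) step, then join); indexing cs[q] is exact via
-- getD: 0 ≤ k//n < len(cs) on every rank k < total that is used
def pvDecodeB : List (List Char × Nat) → Nat → List Char
  | [], _ => []
  | (cs, n) :: steps, k => cs.getD (k / n) ' ' :: pvDecodeB steps (k % n)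

def generate_mask_passwords_alt (mask : String) : List String :=
  let positions := pvParseB mask.toList
  -- steps built: for cs in reversed(positions): steps.append((cs, n)); n *= len(cs); then reversed
  let sn := positions.reverse.foldl
    (fun (acc : List (List Char × Nat) × Nat) cs => (acc.1 ++ [(cs, acc.2)], acc.2 * cs.length))
    ([], 1)
  (List.range sn.2).map (fun k => String.mk (pvDecodeB sn.1.reverse k))

-- ===== PRECONDITION & SPEC =====
def Spec_generate_mask_passwords (mask : String) (out : List String) : Prop := out = generate_mask_passwords_alt mask
instance (mask : String) (out : List String) : Decidable (Spec_generate_mask_passwords mask out) := by unfold Spec_generate_mask_passwords; infer_instance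

-- ===== CLAIM (what is proved, stated in full; the proofs are below) =====
def Claim_equal_generate_mask_passwords : Prop := ∀ (mask : String), Dom_generate_mask_passwords mask → Spec_generate_mask_passwords mask (generate_mask_passwords mask)

-- ===== LEMMAS AND PROOFS =====

-- proof-side helpers
def pvSize : List (List Char) → Nat
  | [] => 1
  | p :: ps => p.length * pvSize ps

def pvStepsR : List (List Char) → List (List Char × Nat)
  | [] => []
  | p :: ps => (p, pvSize ps) :: pvStepsR ps

theorem pvStepsFold (ps : List (List Char)) :
    ps.reverse.foldl
      (fun (acc : List (List Char × Nat) × Nat) cs => (acc.1 ++ [(cs, acc.2)], acc.2 * cs.length))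
      ([], 1)
      = ((pvStepsR ps).reverse, pvSize ps) := by
  induction ps with
  | nil => rfl
  | cons p ps ih =>
    simp only [List.reverse_cons, List.foldl_append, ih, List.foldl_cons, List.foldl_nil,
      pvStepsR, pvSize]
    exact Prod.ext rfl (Nat.mul_comm _ _)

-- reference enumeration: cartesian product by recursion on the pools
def pvE : List (List Char) → List (List Char)
  | [] => [[]]
  | p :: ps => p.flatMap (fun c => (pvE ps).map (fun w => c :: w))

theorem pvParseB_eq_parseA : ∀ l, pvParseB l = pvParseA l := by
  intro l
  induction l using pvParseA.induct with
  | case1 => rfl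
  | case2 c => rfl
  | case3 c c2 rest' cs hcs ih => simp [pvParseA, pvParseB, hcs, ih]
  | case4 c c2 rest' hnone ih => simp [pvParseA, pvParseB, hnone, ih]

theorem pvCharset_ne_nil (t : String) (cs : List Char)
    (h : PySem.Dict.get? pvMaskCharsets t = some cs) : cs ≠ [] := by
  simp only [pvMaskCharsets, PySem.Dict.get?, Option.map_eq_some_iff] at h
  obtain ⟨q, hf, rfl⟩ := h
  have hq := List.mem_of_find?_eq_some hf
  simp only [List.mem_cons, List.not_mem_nil, or_false] at hq
  rcases hq with rfl | rfl | rfl | rfl | rfl <;> simp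

theorem pvParseA_ne_nil : ∀ l, ∀ p ∈ pvParseA l, p ≠ [] := by
  intro l
  induction l using pvParseA.induct with
  | case1 => simp [pvParseA]
  | case2 c => simp [pvParseA]
  | case3 c c2 rest' cs hcs ih =>
    simp only [pvParseA, hcs, List.mem_cons]
    rintro p (rfl | hp)
    · exact pvCharset_ne_nil _ _ hcs
    · exact ih p hp
  | case4 c c2 rest' hnone ih =>
    simp only [pvParseA, hnone, List.mem_cons]
    rintro p (rfl | hp)
    · simp
    · exact ih p hp

theorem pvSize_pos : ∀ ps : List (List Char), (∀ p ∈ ps, p ≠ []) → 0 < pvSize ps := by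
  intro ps h
  induction ps with
  | nil => simp [pvSize]
  | cons p ps ih =>
    have hp : p ≠ [] := h p (by simp)
    have : 0 < p.length := List.length_pos_iff.mpr hp
    exact Nat.mul_pos this (ih (fun q hq => h q (by simp [hq])))

-- A-side: the foldl product equals pvE
theorem pvProductA_fold (pools : List (List Char)) :
    ∀ acc : List (List Char),
      pools.foldl (fun result pool => result.flatMap (fun x => pool.map (fun y => x ++ [y]))) acc
        = acc.flatMap (fun x => (pvE pools).map (fun w => x ++ w)) := by
  induction pools with
  | nil => intro acc; simp [pvE]
  | cons p ps ih =>
    intro acc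
    simp only [List.foldl_cons, ih, pvE]
    rw [List.flatMap_assoc]
    apply List.flatMap_congr
    intro x _
    simp [List.flatMap_map, List.map_flatMap, List.map_map, Function.comp_def]

theorem pvProductA_eq_E (pools : List (List Char)) : pvProductA pools = pvE pools := by
  rw [pvProductA, pvProductA_fold]
  simp

-- B-side helpers
theorem pvRange_mul (a b : Nat) :
    List.range (a * b) = (List.range a).flatMap (fun i => (List.range b).map (fun j => i * b + j)) := by
  induction a with
  | zero => simp
  | succ a ih =>
    rw [Nat.succ_mul, List.range_add, ih, List.range_succ, List.flatMap_append]
    simp [Nat.add_comm]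

theorem pvFlatMap_range_getD (p : List Char) (f : Char → List (List Char)) :
    (List.range p.length).flatMap (fun i => f (p.getD i ' ')) = p.flatMap f := by
  induction p with
  | nil => simp
  | cons c p ih =>
    rw [List.length_cons, List.range_succ_eq_map]
    simp only [List.flatMap_cons, List.flatMap_map, List.getD_cons_zero, List.getD_cons_succ]
    rw [ih]

theorem pvDecode_range (ps : List (List Char)) (h : ∀ p ∈ ps, p ≠ []) :
    (List.range (pvSize ps)).map (pvDecodeB (pvStepsR ps)) = pvE ps := by
  induction ps with
  | nil => simp [pvSize, pvStepsR, pvDecodeB, pvE, List.range_succ]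
  | cons p ps ih =>
    have hN : 0 < pvSize ps := pvSize_pos ps (fun q hq => h q (by simp [hq]))
    have hrest := ih (fun q hq => h q (by simp [hq]))
    rw [show pvSize (p :: ps) = p.length * pvSize ps from rfl, pvRange_mul, List.map_flatMap]
    have hblock : ∀ i, ((List.range (pvSize ps)).map (fun j => i * pvSize ps + j)).map (pvDecodeB (pvStepsR (p :: ps)))
        = (pvE ps).map (fun w => p.getD i ' ' :: w) := by
      intro i
      rw [List.map_map, ← hrest, List.map_map]
      apply List.map_congr_left
      intro j hj
      have hjlt : j < pvSize ps := List.mem_range.mp hj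
      show pvDecodeB (pvStepsR (p :: ps)) (i * pvSize ps + j) = p.getD i ' ' :: pvDecodeB (pvStepsR ps) j
      have hdiv : (i * pvSize ps + j) / pvSize ps = i := by
        rw [Nat.mul_comm, Nat.mul_add_div hN, Nat.div_eq_of_lt hjlt, Nat.add_zero]
      have hmod : (i * pvSize ps + j) % pvSize ps = j := by
        rw [Nat.mul_comm, Nat.mul_add_mod, Nat.mod_eq_of_lt hjlt]
      simp [pvStepsR, pvDecodeB, hdiv, hmod]
    calc (List.range p.length).flatMap
            (fun i => ((List.range (pvSize ps)).map (fun j => i * pvSize ps + j)).map (pvDecodeB (pvStepsR (p :: ps))))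
        = (List.range p.length).flatMap (fun i => (pvE ps).map (fun w => p.getD i ' ' :: w)) := by
          exact List.flatMap_congr (fun i _ => hblock i)
      _ = p.flatMap (fun c => (pvE ps).map (fun w => c :: w)) :=
          pvFlatMap_range_getD p (fun c => (pvE ps).map (fun w => c :: w))
      _ = pvE (p :: ps) := rfl

-- ===== VERDICT (by name: the statement is the Claim_ definition above) =====
theorem generate_mask_passwords_spec : Claim_equal_generate_mask_passwords := by
  intro mask _
  unfold Spec_generate_mask_passwords
  unfold generate_mask_passwords generate_mask_passwords_alt
  simp only [pvStepsFold, pvParseB_eq_parseA]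
  rw [pvProductA_eq_E, ← pvDecode_range _ (pvParseA_ne_nil mask.toList), List.map_map]
  simp [Function.comp_def]
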